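-- pv_equiv track=rewrite | github.com/StarsExpress/LeetCode-Repository | heaps/2931_hard/max_spending.py | maximize_spending
-- ===== SOURCE A (Python) =====
-- import heapq
--
-- def maximize_spending(values: list[list[int]]) -> int:  # LeetCode Q.2931.
--     # Min heap. Format: (item, row idx).
--     items_heap: list[tuple[int, int]] = []
--     for row_idx in range(len(values)):
--         item = values[row_idx].pop(-1)
--         heapq.heappush(items_heap, (item, row_idx))
--
--     max_spent_money, day = 0, 1
--     while items_heap:
--         item, row_idx = heapq.heappop(items_heap)
--         max_spent_money += item * day
--         day += 1
--
--         if values[row_idx]: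
--             new_item = values[row_idx].pop(-1)
--             heapq.heappush(items_heap, (new_item, row_idx))
--
--     return max_spent_money
-- ===== SOURCE B (Python) =====
-- def maximize_spending(values: list[list[int]]) -> int:  # LeetCode Q.2931.
--     # Mutates `values` like A (leaves every row empty); requires all rows non-empty, like A.
--     total, day = 0, 1
--     while True:
--         best_val = None
--         best_row = None
--         for r, row in enumerate(values):
--             if row and (best_val is None or row[-1] < best_val):
--                 best_val, best_row = row[-1], r
--         if best_row is None:
--             break
--         values[best_row].pop()
--         total += best_val * day
--         day += 1
--     return total
-- ===== Notes on version B (the rewrite author's own statement) =====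
-- stated objective: simpler
-- what changed: Replaces the heapq priority queue (initial push pass plus pop/refill loop) with a single plain loop that repeatedly scans the rows for the smallest current tail element (strict '<' ties toward the lowest row index, matching the heap's (value,row) order) and pops it.
import Mathlib
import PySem

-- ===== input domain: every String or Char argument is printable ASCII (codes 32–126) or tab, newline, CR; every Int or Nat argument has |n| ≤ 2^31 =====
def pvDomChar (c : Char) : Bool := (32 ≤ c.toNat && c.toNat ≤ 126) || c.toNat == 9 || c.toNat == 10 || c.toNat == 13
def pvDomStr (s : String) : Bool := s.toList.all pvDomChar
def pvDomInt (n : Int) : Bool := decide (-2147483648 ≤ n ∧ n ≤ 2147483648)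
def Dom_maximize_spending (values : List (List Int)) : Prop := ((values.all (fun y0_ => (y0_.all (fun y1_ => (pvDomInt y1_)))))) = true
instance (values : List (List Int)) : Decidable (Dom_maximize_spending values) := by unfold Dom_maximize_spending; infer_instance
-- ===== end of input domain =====

-- B drops heapq and repeatedly scans the rows for the smallest current tail element (same
-- (value, row-index) tie-breaking as the heap); equivalence is about the RETURN value — both
-- Pythons also mutate `values` identically (every row emptied) on inputs satisfying Pre_.

-- ===== PORT A =====
-- Python's heapq on distinct (item, row_idx) pairs: heappop returns the lexicographically
-- smallest pair; the port keeps the heap as a plain list and pops the lexicographic minimum.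
def lexLt (p q : Int × Int) : Bool := p.1 < q.1 || (p.1 == q.1 && p.2 < q.2)

def heapMin (b : Int × Int) (h : List (Int × Int)) : Int × Int :=
  h.foldl (fun b p => if lexLt p b then p else b) b

-- the initial for-loop: values[row_idx].pop(-1) for every row; none = IndexError (empty row)
def aInitGo : List (List Int) → Int → Option (List (Int × Int))
  | [], _ => some []
  | row :: rest, idx =>
    match row.getLast? with
    | none => none
    | some v =>
      match aInitGo rest (idx + 1) with
      | none => none
      | some hs => some ((v, idx) :: hs)

-- the while-loop; fuel = total number of items (each iteration consumes exactly one)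
-- row indices in the heap are non-negative and in range, so `getD`/`toNat` are exact here
def aLoop : Nat → List (Int × Int) → List (List Int) → Int → Int → Int
  | 0, _, _, total, _ => total
  | fuel + 1, heap, rows, total, day =>
    match heap with
    | [] => total
    | p :: rest =>
      let m := heapMin p rest
      let h' := (p :: rest).erase m
      let row := rows.getD m.2.toNat []
      if row = [] then
        aLoop fuel h' rows (total + m.1 * day) (day + 1)
      else
        match row.getLast? with
        | none => 0  -- unreachable: row ≠ []
        | some w =>
          aLoop fuel (h' ++ [(w, m.2)]) (rows.set m.2.toNat row.dropLast)
            (total + m.1 * day) (day + 1)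

def maximize_spending (values : List (List Int)) : Int :=
  match aInitGo values 0 with
  | none => 0  -- Python raises IndexError here; excluded by Pre_
  | some heap => aLoop (values.map List.length).sum heap (values.map List.dropLast) 0 1

-- ===== PORT B =====
-- the inner for-loop of Source B: best (value, row) over non-empty rows, strict '<' keeps lowest index
def pickBest : List (List Int) → Int → Option (Int × Int) → Option (Int × Int)
  | [], _, best => best
  | row :: rest, r, best =>
    match row.getLast? with
    | none => pickBest rest (r + 1) best
    | some v =>
      match best with
      | none => pickBest rest (r + 1) (some (v, r))
      | some (bv, bi) => pickBest rest (r + 1) (if v < bv then some (v, r) else some (bv, bi))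

-- the while-loop; fuel = total number of items (each iteration pops exactly one)
def bLoop : Nat → List (List Int) → Int → Int → Int
  | 0, _, total, _ => total
  | fuel + 1, rows, total, day =>
    match pickBest rows 0 none with
    | none => total
    | some (v, r) =>
      bLoop fuel (rows.set r.toNat (rows.getD r.toNat []).dropLast) (total + v * day) (day + 1)

def maximize_spending_alt (values : List (List Int)) : Int :=
  bLoop (values.map List.length).sum values 0 1

-- ===== PRECONDITION & SPEC =====
-- A raises IndexError on values[row_idx].pop(-1) when some row is initially empty
def Pre_maximize_spending (values : List (List Int)) : Prop := ∀ row ∈ values, row ≠ []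
instance (values : List (List Int)) : Decidable (Pre_maximize_spending values) := by
  unfold Pre_maximize_spending; infer_instance

def pvWitness_maximize_spending : List (List Int) := [[8, 5, 2], [7, 3, 1]]

def Spec_maximize_spending (values : List (List Int)) (out : Int) : Prop := out = maximize_spending_alt values
instance (values : List (List Int)) (out : Int) : Decidable (Spec_maximize_spending values out) := by
  unfold Spec_maximize_spending; infer_instance

-- ===== CLAIM (what is proved, stated in full; the proofs are below) =====
def Claim_equal_maximize_spending : Prop := ∀ (values : List (List Int)), Dom_maximize_spending values → Pre_maximize_spending values → Spec_maximize_spending values (maximize_spending values)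

-- ===== LEMMAS AND PROOFS =====

-- candidate list of B's state: (last element, row index) of every non-empty row, in index order
def entOf (row : List Int) (k : Int) : List (Int × Int) :=
  match row.getLast? with
  | some v => [(v, k)]
  | none => []

def candsAux : List (List Int) → Int → List (Int × Int)
  | [], _ => []
  | row :: rest, k => entOf row k ++ candsAux rest (k + 1)

def lexLe (p q : Int × Int) : Prop := lexLt p q = true ∨ p = q

theorem lexLe_refl (p : Int × Int) : lexLe p p := Or.inr rfl

theorem lexLt_trans {p q r : Int × Int} (h1 : lexLt p q = true) (h2 : lexLt q r = true) :
    lexLt p r = true := by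
  simp only [lexLt, Bool.or_eq_true, Bool.and_eq_true, decide_eq_true_eq, beq_iff_eq] at *
  rcases h1 with h1 | ⟨h1, h1'⟩ <;> rcases h2 with h2 | ⟨h2, h2'⟩ <;> [left; left; left; right] <;> omega

theorem lexLe_trans {p q r : Int × Int} (h1 : lexLe p q) (h2 : lexLe q r) : lexLe p r := by
  rcases h1 with h1 | rfl
  · rcases h2 with h2 | rfl
    · exact Or.inl (lexLt_trans h1 h2)
    · exact Or.inl h1
  · exact h2

theorem lexLe_of_not_lt {p q : Int × Int} (h : ¬ lexLt p q = true) : lexLe q p := by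
  simp only [lexLt, Bool.or_eq_true, Bool.and_eq_true, decide_eq_true_eq, beq_iff_eq,
    not_or, not_and, not_lt] at h
  by_cases h1 : q.1 = p.1
  · by_cases h2 : q.2 = p.2
    · exact Or.inr (Prod.ext h1 h2)
    · refine Or.inl ?_
      simp only [lexLt, Bool.or_eq_true, Bool.and_eq_true, decide_eq_true_eq, beq_iff_eq]
      have := h.2 h1.symm
      exact Or.inr ⟨h1, by omega⟩
  · refine Or.inl ?_
    simp only [lexLt, Bool.or_eq_true, Bool.and_eq_true, decide_eq_true_eq, beq_iff_eq]
    have := h.1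
    exact Or.inl (by omega)

theorem lexLe_antisymm {p q : Int × Int} (h1 : lexLe p q) (h2 : lexLe q p) : p = q := by
  rcases h1 with h1 | rfl
  · rcases h2 with h2 | rfl
    · exfalso
      have := lexLt_trans h1 h2
      simp only [lexLt, Bool.or_eq_true, Bool.and_eq_true, decide_eq_true_eq, beq_iff_eq] at this
      omega
    · rfl
  · rfl

theorem heapMin_spec (h : List (Int × Int)) (b : Int × Int) :
    heapMin b h ∈ b :: h ∧ lexLe (heapMin b h) b ∧ ∀ q ∈ h, lexLe (heapMin b h) q := by
  induction h generalizing b with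
  | nil => exact ⟨List.mem_singleton.mpr rfl, lexLe_refl b, by simp⟩
  | cons p t ih =>
    have step : heapMin b (p :: t) = heapMin (if lexLt p b then p else b) t := rfl
    by_cases hlt : lexLt p b = true
    · obtain ⟨h1, h2, h3⟩ := ih p
      rw [step, if_pos hlt]
      refine ⟨?_, ?_, ?_⟩
      · rcases List.mem_cons.mp h1 with he | h1
        · rw [he]; exact List.mem_cons_of_mem _ List.mem_cons_self
        · exact List.mem_cons_of_mem _ (List.mem_cons_of_mem _ h1)
      · exact lexLe_trans h2 (Or.inl hlt)
      · intro q hq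
        rcases List.mem_cons.mp hq with he | hq
        · rw [he]; exact h2
        · exact h3 q hq
    · obtain ⟨h1, h2, h3⟩ := ih b
      rw [step, if_neg hlt]
      refine ⟨?_, h2, ?_⟩
      · rcases List.mem_cons.mp h1 with he | h1
        · rw [he]; exact List.mem_cons_self
        · exact List.mem_cons_of_mem _ (List.mem_cons_of_mem _ h1)
      · intro q hq
        rcases List.mem_cons.mp hq with he | hq
        · rw [he]; exact lexLe_trans h2 (lexLe_of_not_lt hlt)
        · exact h3 q hq

theorem candsAux_index_ge : ∀ (rows : List (List Int)) (j : Int), ∀ p ∈ candsAux rows j, j ≤ p.2 := by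
  intro rows
  induction rows with
  | nil => intro j p hp; simp [candsAux] at hp
  | cons row rest ih =>
    intro j p hp
    simp only [candsAux, List.mem_append] at hp
    rcases hp with hp | hp
    · cases hlast : row.getLast? with
      | none => simp [entOf, hlast] at hp
      | some v =>
        simp [entOf, hlast] at hp
        subst hp; simp
    · have := ih (j + 1) p hp; omega

theorem candsAux_mem_elim : ∀ (rows : List (List Int)) (j : Int) (p : Int × Int),
    p ∈ candsAux rows j →
    ∃ k : Nat, k < rows.length ∧ p.2 = j + k ∧ (rows.getD k []).getLast? = some p.1 := by
  intro rows
  induction rows with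
  | nil => intro j p hp; simp [candsAux] at hp
  | cons row rest ih =>
    intro j p hp
    simp only [candsAux, List.mem_append] at hp
    rcases hp with hp | hp
    · cases hlast : row.getLast? with
      | none => simp [entOf, hlast] at hp
      | some v =>
        simp [entOf, hlast] at hp
        subst hp
        exact ⟨0, by simp, by simp, by simp [List.getD, hlast]⟩
    · obtain ⟨k, hk, hpk, hlast⟩ := ih (j + 1) p hp
      exact ⟨k + 1, by simpa using hk, by push_cast at hpk ⊢; omega, by simpa [List.getD] using hlast⟩

-- pickBest with a running best whose index is below every remaining candidate's index
-- computes the lexicographic minimum of best :: candidates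
theorem pickBest_some_spec : ∀ (rows : List (List Int)) (j bv bi : Int),
    (∀ p ∈ candsAux rows j, bi < p.2) →
    ∃ m, pickBest rows j (some (bv, bi)) = some m ∧ m ∈ (bv, bi) :: candsAux rows j ∧
      ∀ q ∈ (bv, bi) :: candsAux rows j, lexLe m q := by
  intro rows
  induction rows with
  | nil =>
    intro j bv bi _
    refine ⟨(bv, bi), rfl, List.mem_cons_self, ?_⟩
    intro q hq
    simp [candsAux] at hq
    rw [hq]; exact lexLe_refl _
  | cons row rest ih =>
    intro j bv bi hbound
    simp only [candsAux] at hbound ⊢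
    cases hlast : row.getLast? with
    | none =>
      have hent : entOf row j = [] := by simp [entOf, hlast]
      rw [hent, List.nil_append] at hbound ⊢
      simp only [pickBest, hlast]
      exact ih (j + 1) bv bi hbound
    | some v =>
      have hent : entOf row j ++ candsAux rest (j + 1) = (v, j) :: candsAux rest (j + 1) := by
        simp [entOf, hlast]
      rw [hent] at hbound ⊢
      simp only [pickBest, hlast]
      by_cases hv : v < bv
      · rw [if_pos hv]
        have hb : ∀ p ∈ candsAux rest (j + 1), j < p.2 := by
          intro p hp; have := candsAux_index_ge rest (j + 1) p hp; omega
        obtain ⟨m, hm, hmem, hle⟩ := ih (j + 1) v j hb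
        have hvj_lt : lexLt (v, j) (bv, bi) = true := by
          simp [lexLt]; omega
        refine ⟨m, hm, List.mem_cons_of_mem _ hmem, ?_⟩
        intro q hq
        rcases List.mem_cons.mp hq with he | hq
        · rw [he]; exact lexLe_trans (hle _ List.mem_cons_self) (Or.inl hvj_lt)
        · exact hle q hq
      · rw [if_neg hv]
        have hbij : bi < j := hbound (v, j) List.mem_cons_self
        have hle_bv : lexLe (bv, bi) (v, j) := by
          refine Or.inl ?_
          simp [lexLt]; omega
        have hb : ∀ p ∈ candsAux rest (j + 1), bi < p.2 := by
          intro p hp; exact hbound p (List.mem_cons_of_mem _ hp)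
        obtain ⟨m, hm, hmem, hle⟩ := ih (j + 1) bv bi hb
        refine ⟨m, hm, ?_, ?_⟩
        · rcases List.mem_cons.mp hmem with he | hmem
          · rw [he]; exact List.mem_cons_self
          · exact List.mem_cons_of_mem _ (List.mem_cons_of_mem _ hmem)
        · intro q hq
          rcases List.mem_cons.mp hq with he | hq
          · rw [he]; exact hle _ List.mem_cons_self
          · rcases List.mem_cons.mp hq with he | hq
            · rw [he]; exact lexLe_trans (hle _ List.mem_cons_self) hle_bv
            · exact hle q (List.mem_cons_of_mem _ hq)

theorem pickBest_none_spec : ∀ (rows : List (List Int)) (j : Int),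
    (candsAux rows j = [] ∧ pickBest rows j none = none) ∨
    (∃ m, pickBest rows j none = some m ∧ m ∈ candsAux rows j ∧
      ∀ q ∈ candsAux rows j, lexLe m q) := by
  intro rows
  induction rows with
  | nil => intro j; left; exact ⟨rfl, rfl⟩
  | cons row rest ih =>
    intro j
    simp only [candsAux]
    cases hlast : row.getLast? with
    | none =>
      have hent : entOf row j = [] := by simp [entOf, hlast]
      rw [hent, List.nil_append]
      simp only [pickBest, hlast]
      exact ih (j + 1)
    | some v =>
      right
      have hent : entOf row j ++ candsAux rest (j + 1) = (v, j) :: candsAux rest (j + 1) := by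
        simp [entOf, hlast]
      rw [hent]
      simp only [pickBest, hlast]
      have hb : ∀ p ∈ candsAux rest (j + 1), j < p.2 := by
        intro p hp; have := candsAux_index_ge rest (j + 1) p hp; omega
      exact pickBest_some_spec rest (j + 1) v j hb

theorem min_unique {l : List (Int × Int)} {m1 m2 : Int × Int}
    (h1 : m1 ∈ l) (h1' : ∀ q ∈ l, lexLe m1 q) (h2 : m2 ∈ l) (h2' : ∀ q ∈ l, lexLe m2 q) :
    m1 = m2 :=
  lexLe_antisymm (h1' m2 h2) (h2' m1 h1)

-- candidate list after popping the last element of row k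
theorem cands_set : ∀ (rows : List (List Int)) (k : Nat) (j v : Int),
    (rows.getD k []).getLast? = some v →
    (candsAux (rows.set k (rows.getD k []).dropLast) j).Perm
      (((candsAux rows j).erase (v, j + k)) ++ entOf ((rows.getD k []).dropLast) (j + k)) := by
  intro rows
  induction rows with
  | nil => intro k j v hv; simp [List.getD] at hv
  | cons row rest ih =>
    intro k j v hv
    cases k with
    | zero =>
      simp only [List.getD_cons_zero] at hv ⊢
      simp only [List.set_cons_zero, candsAux]
      have : entOf row j = [(v, j)] := by simp [entOf, hv]
      rw [this]
      simp only [Nat.cast_zero, add_zero, List.singleton_append, List.erase_cons_head]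
      exact List.perm_append_comm
    | succ k =>
      simp only [List.getD_cons_succ] at hv ⊢
      simp only [List.set_cons_succ, candsAux]
      have hne : (v, j + ((k : Int) + 1)) ∉ entOf row j := by
        cases hl : row.getLast? with
        | none => simp [entOf, hl]
        | some w =>
          simp [entOf, hl, Prod.ext_iff]
          intro _; omega
      have hcast : (((k : Nat) + 1 : Nat) : Int) = (k : Int) + 1 := by omega
      rw [hcast]
      rw [List.erase_append_right _ hne]
      have ihh := ih k (j + 1) v hv
      have hidx : j + ((k : Int) + 1) = (j + 1) + (k : Nat) := by omega
      rw [hidx, List.append_assoc]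
      exact List.Perm.append_left _ ihh

-- map dropLast commutes with set
theorem dropLast_map_set : ∀ (rows : List (List Int)) (k : Nat) (x : List Int),
    (rows.set k x).map List.dropLast = (rows.map List.dropLast).set k x.dropLast := by
  intro rows
  induction rows with
  | nil => intro k x; rfl
  | cons row rest ih =>
    intro k x
    cases k with
    | zero => rfl
    | succ k => simp only [List.set_cons_succ, List.map_cons, ih]

theorem set_getD_self (rows : List (List Int)) (k : Nat) (hk : k < rows.length) :
    rows.set k (rows.getD k []) = rows := by
  rw [List.getD_eq_getElem rows [] hk]
  exact List.set_getElem_self hk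

-- one-step unfoldings of the two loops
theorem aLoop_succ (fuel : Nat) (p : Int × Int) (rest : List (Int × Int))
    (rows : List (List Int)) (total day : Int) :
    aLoop (fuel + 1) (p :: rest) rows total day =
      (if (rows.getD (heapMin p rest).2.toNat []) = [] then
        aLoop fuel ((p :: rest).erase (heapMin p rest)) rows
          (total + (heapMin p rest).1 * day) (day + 1)
      else
        match (rows.getD (heapMin p rest).2.toNat []).getLast? with
        | none => 0
        | some w =>
          aLoop fuel (((p :: rest).erase (heapMin p rest)) ++ [(w, (heapMin p rest).2)])
            (rows.set (heapMin p rest).2.toNat (rows.getD (heapMin p rest).2.toNat []).dropLast)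
            (total + (heapMin p rest).1 * day) (day + 1)) := rfl

theorem bLoop_succ (fuel : Nat) (rows : List (List Int)) (total day : Int) :
    bLoop (fuel + 1) rows total day =
      (match pickBest rows 0 none with
      | none => total
      | some (v, r) =>
        bLoop fuel (rows.set r.toNat (rows.getD r.toNat []).dropLast) (total + v * day) (day + 1)) := rfl

-- the main simulation: A's heap-loop equals B's scan-loop under the invariant
-- heap ~ candidates(rowsB) and rowsA = rowsB with the last element of each row dropped
theorem loop_eq : ∀ (fuel : Nat) (rowsB : List (List Int)) (heap : List (Int × Int)) (total day : Int),
    heap.Perm (candsAux rowsB 0) →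
    aLoop fuel heap (rowsB.map List.dropLast) total day = bLoop fuel rowsB total day := by
  intro fuel
  induction fuel with
  | zero => intro rowsB heap total day _; rfl
  | succ fuel ih =>
    intro rowsB heap total day hperm
    cases hheap : heap with
    | nil =>
      rw [hheap] at hperm
      have hcnil : candsAux rowsB 0 = [] := hperm.symm.eq_nil
      have hpick : pickBest rowsB 0 none = none := by
        rcases pickBest_none_spec rowsB 0 with ⟨_, h⟩ | ⟨m, _, hmemx, _⟩
        · exact h
        · rw [hcnil] at hmemx; simp at hmemx
      rw [bLoop_succ, hpick]
      rfl
    | cons p rest =>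
      rw [hheap] at hperm
      obtain ⟨hmem, hleb, hlet⟩ := heapMin_spec rest p
      have hleAll : ∀ q ∈ p :: rest, lexLe (heapMin p rest) q := by
        intro q hq
        rcases List.mem_cons.mp hq with he | hq
        · rw [he]; exact hleb
        · exact hlet q hq
      have hmem_c : heapMin p rest ∈ candsAux rowsB 0 := hperm.mem_iff.mp hmem
      have hle_c : ∀ q ∈ candsAux rowsB 0, lexLe (heapMin p rest) q :=
        fun q hq => hleAll q (hperm.mem_iff.mpr hq)
      have hpick : pickBest rowsB 0 none = some (heapMin p rest) := by
        rcases pickBest_none_spec rowsB 0 with ⟨hcnil, _⟩ | ⟨m', hm', hmemx, hlex⟩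
        · rw [hcnil] at hmem_c; simp at hmem_c
        · rw [hm', min_unique hmemx hlex hmem_c hle_c]
      obtain ⟨k, hk, hk2, hlast⟩ := candsAux_mem_elim rowsB 0 _ hmem_c
      have hperm_e : ((p :: rest).erase (heapMin p rest)).Perm
          ((candsAux rowsB 0).erase (heapMin p rest)) := hperm.erase _
      -- destructure the minimum
      set m := heapMin p rest with hm
      obtain ⟨mv, mi⟩ := m
      simp only [] at hk2 hlast hpick hperm_e hm ⊢
      have hk2' : mi.toNat = k := by
        have : mi = (k : Int) := by omega
        rw [this]; exact Int.toNat_natCast k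
      have hmi : mi = (k : Int) := by omega
      have hkmap : k < (rowsB.map List.dropLast).length := by simpa using hk
      have hrowA : (rowsB.map List.dropLast).getD k [] = (rowsB.getD k []).dropLast := by
        rw [List.getD_eq_getElem _ [] hkmap, List.getD_eq_getElem _ [] hk]
        simp
      have hcs := cands_set rowsB k 0 mv hlast
      rw [zero_add, ← hmi] at hcs
      rw [aLoop_succ, bLoop_succ, hpick, ← hm]
      simp only [hk2', hrowA]
      by_cases hdrop : (rowsB.getD k []).dropLast = []
      · rw [if_pos hdrop]
        have hsetB : (rowsB.set k (rowsB.getD k []).dropLast).map List.dropLast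
            = rowsB.map List.dropLast := by
          rw [hdrop]
          have h0 : ([] : List Int) = ((rowsB.map List.dropLast).getD k []) := by
            rw [hrowA, hdrop]
          rw [dropLast_map_set]
          simp only [List.dropLast_nil]
          rw [h0]
          exact set_getD_self _ k hkmap
        rw [← hsetB]
        apply ih
        have hent0 : entOf ((rowsB.getD k []).dropLast) mi = [] := by rw [hdrop]; rfl
        rw [hent0, List.append_nil] at hcs
        exact hperm_e.trans hcs.symm
      · obtain ⟨w, hw⟩ : ∃ w, ((rowsB.getD k []).dropLast).getLast? = some w := by
          cases hlw : ((rowsB.getD k []).dropLast).getLast? with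
          | none => exact absurd (List.getLast?_eq_none_iff.mp hlw) hdrop
          | some w => exact ⟨w, rfl⟩
        rw [if_neg hdrop, hw]
        have hmapset : (rowsB.map List.dropLast).set k ((rowsB.getD k []).dropLast).dropLast
            = (rowsB.set k (rowsB.getD k []).dropLast).map List.dropLast := by
          rw [dropLast_map_set]
        rw [hmapset]
        apply ih
        have hent : entOf ((rowsB.getD k []).dropLast) mi = [(w, mi)] := by
          unfold entOf
          rw [hw]
        rw [hent] at hcs
        exact (hperm_e.append (List.Perm.refl [(w, mi)])).trans hcs.symm

theorem aInitGo_eq : ∀ (values : List (List Int)) (j : Int),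
    (∀ row ∈ values, row ≠ []) → aInitGo values j = some (candsAux values j) := by
  intro values
  induction values with
  | nil => intro j _; rfl
  | cons row rest ih =>
    intro j hpre
    have hne : row ≠ [] := hpre row List.mem_cons_self
    obtain ⟨v, hv⟩ : ∃ v, row.getLast? = some v := by
      cases hlw : row.getLast? with
      | none => exact absurd (List.getLast?_eq_none_iff.mp hlw) hne
      | some v => exact ⟨v, rfl⟩
    simp [aInitGo, hv, ih (j + 1) (fun r hr => hpre r (List.mem_cons_of_mem _ hr)), candsAux, entOf]

-- ===== VERDICT (by name: the statement is the Claim_ definition above) =====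
theorem maximize_spending_spec : Claim_equal_maximize_spending := by
  intro values _ hpre
  unfold Spec_maximize_spending maximize_spending maximize_spending_alt
  rw [aInitGo_eq values 0 hpre]
  exact loop_eq _ values _ 0 1 (List.Perm.refl _)
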